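-- pv_equiv track=rewrite | github.com/hyoinandout/problem-solving | introduction-algorithm/hw2/Sub_p3_bonus.py | budget
-- ===== SOURCE A (Python) =====
-- def budget(evaluation):
--     up = 1
--     down = 0
--     level = 1
--     peak = 0
--     for i in range(1,len(evaluation)):
--         if evaluation[i]>evaluation[i-1]:
--             up += 1
--             down =  0
--             level += up
--             peak = up
--         elif evaluation[i]==evaluation[i-1]:
--             down = 0
--             peak = 0
--             up = 1
--             level += 1
--         else:
--             down+=1
--             up = 1
--             level += down
--             if peak <= down:
--                 level += 1
--     return level * 1000
-- ===== SOURCE B (Python) =====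
-- def budget(evaluation):
--     # Classic two-pass candy: each run gets max(increasing-run-length, decreasing-run-length).
--     # Computed functionally: left runs, right runs (= left runs of the reversed list), zip.
--     def runs(seq):
--         out = []
--         run = 0
--         prev = None
--         for x in seq:
--             run = run + 1 if prev is not None and x > prev else 1
--             out.append(run)
--             prev = x
--         return out
--     lefts = runs(evaluation)
--     rights = runs(evaluation[::-1])[::-1]
--     return sum(max(l, r) for l, r in zip(lefts, rights)) * 1000
-- ===== Notes on version B (the rewrite author's own statement) =====
-- stated objective: alternative
-- what changed: Replaces A's single streaming pass with O(1) state (up/down run counters and the peak correction) by the classic two-pass candy algorithm: build the per-element table of increasing-run lengths, the table of decreasing-run lengths (runs of the reversed list), and sum the pointwise maxima.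
-- intended difference: On the empty evaluation list A returns 1000 (its leftover initial level = 1) while B returns 0, the intended total for an empty run sequence; on every nonempty list they agree exactly. — e.g. on budget([]): A returns 1000, B returns 0
import Mathlib
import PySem

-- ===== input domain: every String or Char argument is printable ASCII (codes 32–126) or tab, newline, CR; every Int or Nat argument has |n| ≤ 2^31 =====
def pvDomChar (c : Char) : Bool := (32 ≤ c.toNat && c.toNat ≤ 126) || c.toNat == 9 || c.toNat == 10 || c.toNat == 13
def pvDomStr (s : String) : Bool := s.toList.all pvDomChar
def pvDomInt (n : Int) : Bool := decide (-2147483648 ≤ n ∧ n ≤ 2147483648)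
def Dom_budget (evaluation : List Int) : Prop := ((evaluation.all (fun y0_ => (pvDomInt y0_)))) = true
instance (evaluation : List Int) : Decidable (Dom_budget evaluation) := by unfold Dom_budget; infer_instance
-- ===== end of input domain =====

-- B replaces A's single streaming up/down/peak pass by the classic two-pass candy table
-- (per element: max of increasing-run and decreasing-run lengths); return value only.

-- ===== PORT A =====
-- loop body of A on the state (up, down, level, peak), branches in A's order
def stepA (st : Int × Int × Int × Int) (xp xi : Int) : Int × Int × Int × Int :=
  if xi > xp then (st.1 + 1, 0, st.2.2.1 + (st.1 + 1), st.1 + 1)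
  else if xi = xp then (1, 0, st.2.2.1 + 1, 0)
  else (1, st.2.1 + 1, st.2.2.1 + (st.2.1 + 1) + (if st.2.2.2 ≤ st.2.1 + 1 then 1 else 0), st.2.2.2)

def budget (evaluation : List Int) : Int :=
  ((PySem.List.pyRange 1 (evaluation.length : Int) 1).foldl
    (fun st i => stepA st (PySem.List.pyGetD evaluation (i - 1) 0) (PySem.List.pyGetD evaluation i 0))
    (1, 0, 1, 0)).2.2.1 * 1000

-- ===== PORT B =====
-- loop body of B's runs() helper: state (out, run, prev); prev = none exactly while out == []
def stepB (st : List Int × Int × Option Int) (x : Int) : List Int × Int × Option Int :=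
  let run' := match st.2.2 with
    | some p => if x > p then st.2.1 + 1 else 1
    | none => 1
  (st.1 ++ [run'], run', some x)

def runsB (seq : List Int) : List Int := (seq.foldl stepB ([], 0, none)).1

def budget_alt (evaluation : List Int) : Int :=
  let lefts := runsB evaluation
  let rights := ((PySem.List.slice? (runsB ((PySem.List.slice? evaluation none none (-1)).getD [])) none none (-1)).getD [])
  ((lefts.zip rights).map (fun q => max q.1 q.2)).sum * 1000

-- ===== PRECONDITION & SPEC =====
-- On the empty evaluation list A returns 1000 (its leftover initial level = 1), while B returns 0,
-- the intended total for an empty run sequence; everywhere else they agree exactly.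
def D_budget (evaluation : List Int) : Prop := evaluation = []
instance (evaluation : List Int) : Decidable (D_budget evaluation) := by unfold D_budget; infer_instance

def Spec_budget (evaluation : List Int) (out : Int) : Prop := ¬ D_budget evaluation → out = budget_alt evaluation
instance (evaluation : List Int) (out : Int) : Decidable (Spec_budget evaluation out) := by unfold Spec_budget; infer_instance

def pvDiffWitness_budget : List Int := []
def pvDiffWitnessOut_budget : Int × Int := (1000, 0)

-- ===== CLAIM (what is proved, stated in full; the proofs are below) =====
def Claim_unchanged_budget : Prop := ∀ (evaluation : List Int), Dom_budget evaluation → Spec_budget evaluation (budget evaluation)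
def Claim_changed_budget : Prop := Dom_budget (pvDiffWitness_budget) ∧ D_budget (pvDiffWitness_budget) ∧ budget (pvDiffWitness_budget) = pvDiffWitnessOut_budget.1 ∧ budget_alt (pvDiffWitness_budget) = pvDiffWitnessOut_budget.2 ∧ pvDiffWitnessOut_budget.1 ≠ pvDiffWitnessOut_budget.2
def Claim_exact_budget : Prop := ∀ (evaluation : List Int), Dom_budget evaluation → D_budget evaluation → budget evaluation ≠ budget_alt evaluation

-- ===== LEMMAS AND PROOFS =====

-- A's loop as structural recursion over the tail, pivoting on the previous element
def loopA : (Int × Int × Int × Int) → Int → List Int → (Int × Int × Int × Int)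
  | st, _, [] => st
  | st, p, y :: ys => loopA (stepA st p y) y ys

-- the total level increment A's loop adds, with the level component dropped from the state
def phi : Int → Int → Int → Int → List Int → Int
  | _, _, _, _, [] => 0
  | up, down, peak, p, y :: ys =>
    if y > p then (up + 1) + phi (up + 1) 0 (up + 1) y ys
    else if y = p then 1 + phi 1 0 0 y ys
    else (down + 1) + (if peak ≤ down + 1 then 1 else 0) + phi 1 (down + 1) peak y ys

-- right (decreasing-run) candy of p in the list p :: ys
def rrun : Int → List Int → Int
  | _, [] => 1
  | p, y :: ys => if p > y then rrun y ys + 1 else 1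

-- list of right candies of every element of the list
def rlist : List Int → List Int
  | [] => []
  | p :: ys => rrun p ys :: rlist ys

-- left candies of ys continuing a run whose last element has left candy run
def lruns : Int → Int → List Int → List Int
  | run, prev, y :: ys => (if y > prev then run + 1 else 1) :: lruns (if y > prev then run + 1 else 1) y ys
  | _, _, [] => []

-- total candy of p :: ys when the left candy of p is up
def sumB : Int → Int → List Int → Int
  | up, p, [] => max up (rrun p [])
  | up, p, y :: ys => max up (rrun p (y :: ys)) + sumB (if y > p then up + 1 else 1) y ys

theorem foldB_state (xs : List Int) : ∀ (out : List Int) (run p : Int),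
    xs.foldl stepB (out, run, some p)
      = (out ++ lruns run p xs, (lruns run p xs).getLastD run, some (xs.getLastD p)) := by
  induction xs with
  | nil => intro out run p; simp [lruns]
  | cons x xs ih =>
    intro out run p
    by_cases h : x > p
    · rw [List.foldl_cons]
      have e1 : stepB (out, run, some p) x = (out ++ [run + 1], run + 1, some x) := by
        simp [stepB, h]
      rw [e1, ih]
      simp only [lruns, if_pos h, List.append_assoc, List.singleton_append,
        List.getLastD_cons]
    · rw [List.foldl_cons]
      have e1 : stepB (out, run, some p) x = (out ++ [1], 1, some x) := by
        simp [stepB, h]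
      rw [e1, ih]
      simp only [lruns, if_neg h, List.append_assoc, List.singleton_append,
        List.getLastD_cons]

theorem runsB_cons (x : Int) (xs : List Int) : runsB (x :: xs) = 1 :: lruns 1 x xs := by
  have e1 : stepB ([], 0, none) x = ([1], 1, some x) := rfl
  simp [runsB, List.foldl_cons, e1, foldB_state]

theorem runsB_snoc (zs : List Int) (q : Int) (h : zs ≠ []) :
    runsB (zs ++ [q]) = runsB zs ++ [if q > zs.getLastD 0 then (runsB zs).getLastD 0 + 1 else 1] := by
  obtain ⟨z, zs', rfl⟩ := List.exists_cons_of_ne_nil h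
  have e1 : stepB ([], 0, none) z = ([1], 1, some z) := rfl
  simp only [runsB, List.foldl_append, List.foldl_cons, List.foldl_nil, e1, foldB_state]
  simp only [stepB, List.getLastD_cons, List.singleton_append]

theorem runsB_rev (xs : List Int) : runsB xs.reverse = (rlist xs).reverse := by
  induction xs with
  | nil => simp [runsB, rlist]
  | cons p ys ih =>
    match ys, ih with
    | [], _ =>
      have e1 : stepB ([], 0, none) p = ([1], 1, some p) := rfl
      simp [runsB, rlist, rrun, e1]
    | y :: ys', ih =>
      have hne : (y :: ys').reverse ≠ [] := by simp
      rw [List.reverse_cons, runsB_snoc _ _ hne, ih]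
      have h1 : (y :: ys').reverse.getLastD 0 = y := by
        simp [List.getLastD_eq_getLast?, List.getLast?_reverse]
      have h2 : (rlist (y :: ys')).reverse.getLastD 0 = rrun y ys' := by
        simp [rlist, List.getLastD_eq_getLast?, List.getLast?_reverse]
      rw [h1, h2]
      show _ = (rlist (p :: y :: ys')).reverse
      simp only [rlist, rrun, List.reverse_cons]

theorem zip_sum (ys : List Int) : ∀ (up p : Int),
    (((up :: lruns up p ys).zip (rrun p ys :: rlist ys)).map (fun q => max q.1 q.2)).sum
      = sumB up p ys := by
  induction ys with
  | nil => intro up p; simp [lruns, rlist, sumB]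
  | cons y ys ih =>
    intro up p
    have hih := ih (if y > p then up + 1 else 1) y
    simp only [List.zip_cons_cons, List.map_cons, List.sum_cons] at hih
    simp only [lruns, rlist, List.zip_cons_cons, List.map_cons, List.sum_cons, sumB, hih]

theorem budget_alt_cons (x : Int) (ys : List Int) :
    budget_alt (x :: ys) = sumB 1 x ys * 1000 := by
  simp only [budget_alt, PySem.List.slice?_none_none_neg_one, Option.getD_some,
    runsB_rev, List.reverse_reverse, runsB_cons]
  show ((((1 : Int) :: lruns 1 x ys).zip (rlist (x :: ys))).map (fun q => max q.1 q.2)).sum * 1000 = _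
  rw [show rlist (x :: ys) = rrun x ys :: rlist ys from rfl, zip_sum]

theorem loopA_level (ys : List Int) : ∀ (up down level peak p : Int),
    (loopA (up, down, level, peak) p ys).2.2.1 = level + phi up down peak p ys := by
  induction ys with
  | nil => intro up down level peak p; simp [loopA, phi]
  | cons y ys ih =>
    intro up down level peak p
    by_cases h1 : y > p
    · simp [loopA, phi, stepA, h1, ih]; try ring
    · by_cases h2 : y = p
      · simp [loopA, phi, stepA, h2, ih]; try ring
      · simp [loopA, phi, stepA, h1, h2, ih]
        split_ifs <;> ring

theorem getD_append_cons (l t : List Int) (x : Int) : (l ++ x :: t).getD l.length 0 = x := by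
  simp [List.getD]

theorem foldA_eq (ys : List Int) : ∀ (pre : List Int) (p : Int) (st : Int × Int × Int × Int),
    (PySem.List.pyRange ((pre.length : Int) + 1) (((pre ++ p :: ys).length : Int)) 1).foldl
      (fun st i => stepA st (PySem.List.pyGetD (pre ++ p :: ys) (i - 1) 0)
                            (PySem.List.pyGetD (pre ++ p :: ys) i 0)) st
    = loopA st p ys := by
  induction ys with
  | nil =>
    intro pre p st
    rw [PySem.List.pyRange_one_eq_nil (by simp)]
    simp [loopA]
  | cons y ys ih =>
    intro pre p st
    have hlt : ((pre.length : Int) + 1) < (((pre ++ p :: y :: ys).length : Int)) := by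
      simp
    rw [PySem.List.pyRange_one_cons hlt, List.foldl_cons]
    have hg1 : PySem.List.pyGetD (pre ++ p :: y :: ys) ((pre.length : Int) + 1 - 1) 0 = p := by
      rw [show ((pre.length : Int) + 1 - 1) = (pre.length : Int) by ring]
      rw [PySem.List.pyGetD_natCast]
      exact getD_append_cons pre (y :: ys) p
    have hg2 : PySem.List.pyGetD (pre ++ p :: y :: ys) ((pre.length : Int) + 1) 0 = y := by
      rw [show ((pre.length : Int) + 1) = ((pre.length + 1 : Nat) : Int) by push_cast; ring]
      rw [PySem.List.pyGetD_natCast]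
      rw [show pre ++ p :: y :: ys = (pre ++ [p]) ++ y :: ys by simp]
      rw [show pre.length + 1 = (pre ++ [p]).length by simp]
      exact getD_append_cons (pre ++ [p]) ys y
    rw [hg1, hg2]
    rw [show loopA st p (y :: ys) = loopA (stepA st p y) y ys from rfl]
    have := ih (pre ++ [p]) y (stepA st p y)
    simp only [List.append_assoc, List.singleton_append, List.length_append,
      List.length_cons, List.length_nil] at this ⊢
    push_cast at this ⊢
    ring_nf at this ⊢
    exact this

theorem budget_cons (x : Int) (ys : List Int) :
    budget (x :: ys) = (1 + phi 1 0 0 x ys) * 1000 := by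
  have h := foldA_eq ys [] x (1, 0, 1, 0)
  simp only [List.nil_append, List.length_nil, Nat.cast_zero, zero_add] at h
  rw [budget, h, loopA_level]

theorem rrun_pos (ys : List Int) : ∀ p : Int, 1 ≤ rrun p ys := by
  induction ys with
  | nil => intro p; simp [rrun]
  | cons y ys ih =>
    intro p
    simp only [rrun]
    split_ifs with h
    · have := ih y; omega
    · omega

theorem main_inv (ys : List Int) : ∀ (up down peak p : Int),
    1 ≤ up → 0 ≤ down → 0 ≤ peak → (1 ≤ down → up = 1) →
    (down = 0 → peak = up ∨ (peak = 0 ∧ up = 1)) →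
    phi up down peak p ys
      = sumB up p ys - up + (max (down - 1) 0) * (rrun p ys - 1)
        + (if 1 ≤ down then max peak (down + rrun p ys) - max peak (down + 1) else 0) := by
  induction ys with
  | nil =>
    intro up down peak p h1 h2 h3 h4 h5
    simp only [phi, sumB, rrun]
    split_ifs <;> omega
  | cons y ys ih =>
    intro up down peak p h1 h2 h3 h4 h5
    have hR : 1 ≤ rrun y ys := rrun_pos ys y
    by_cases hgt : y > p
    · have hr : rrun p (y :: ys) = 1 := by simp only [rrun]; rw [if_neg (by omega)]
      simp only [phi, sumB, if_pos hgt, hr]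
      rw [ih (up + 1) 0 (up + 1) y (by omega) le_rfl (by omega) (by omega)
        (fun _ => Or.inl rfl)]
      norm_num
      omega
    · by_cases heq : y = p
      · have hr : rrun p (y :: ys) = 1 := by simp only [rrun]; rw [if_neg (by omega)]
        simp only [phi, sumB, if_neg hgt, if_pos heq, hr]
        rw [ih 1 0 0 y le_rfl le_rfl le_rfl (by omega) (fun _ => Or.inr ⟨rfl, rfl⟩)]
        norm_num
        omega
      · have hpy : p > y := by omega
        have hr : rrun p (y :: ys) = rrun y ys + 1 := by
          simp only [rrun]; rw [if_pos hpy]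
        simp only [phi, sumB, if_neg hgt, if_neg heq, hr]
        rw [ih 1 (down + 1) peak y le_rfl (by omega) h3 (fun _ => rfl) (by omega)]
        rcases eq_or_lt_of_le h2 with hd0 | hd1
        · rcases hd0 with rfl
          norm_num
          rcases h5 rfl with rfl | ⟨rfl, rfl⟩ <;> split_ifs <;> omega
        · have hup : up = 1 := h4 hd1
          subst hup
          have e2 : max (down - 1) 0 = down - 1 := max_eq_left (by omega)
          have e3 : max (down + 1 - 1) 0 = down := by
            rw [max_eq_left (by omega)]; ring
          rw [e2, e3]
          by_cases hpk : peak ≤ down + 1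
          · have m3 : max peak (down + 1) = down + 1 := max_eq_right hpk
            have m2 : max peak (down + 1 + 1) = down + 1 + 1 := max_eq_right (by omega)
            have m1 : max peak (down + 1 + rrun y ys) = down + 1 + rrun y ys :=
              max_eq_right (by omega)
            have m1' : max peak (down + (rrun y ys + 1)) = down + (rrun y ys + 1) :=
              max_eq_right (by omega)
            rw [if_pos hpk, if_pos (show (1:Int) ≤ down + 1 by omega), if_pos (show (1:Int) ≤ down by omega), m3, m2, m1, m1']
            have : max (1:Int) (rrun y ys + 1) = rrun y ys + 1 := max_eq_right (by omega)
            rw [this]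
            ring
          · have m3 : max peak (down + 1) = peak := max_eq_left (by omega)
            have m2 : max peak (down + 1 + 1) = peak := max_eq_left (by omega)
            rw [if_neg hpk, if_pos (show (1:Int) ≤ down + 1 by omega), if_pos (show (1:Int) ≤ down by omega), m3, m2]
            have key : max peak (down + 1 + rrun y ys) = max peak (down + (rrun y ys + 1)) := by
              ring_nf
            rw [key]
            have : max (1:Int) (rrun y ys + 1) = rrun y ys + 1 := max_eq_right (by omega)
            rw [this]
            ring


-- ===== VERDICT (by name: the statement is the Claim_ definition above) =====
theorem budget_spec : Claim_unchanged_budget := by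
  intro evaluation _ hnd
  match evaluation with
  | [] => exact absurd rfl hnd
  | x :: ys =>
    rw [budget_cons, budget_alt_cons]
    have h := main_inv ys 1 0 0 x le_rfl le_rfl le_rfl (by omega) (fun _ => Or.inr ⟨rfl, rfl⟩)
    norm_num at h
    rw [h]
    ring

theorem budget_changed : Claim_changed_budget := by unfold Claim_changed_budget; decide

theorem budget_tight : Claim_exact_budget := by
  intro evaluation _ hd
  rw [hd]
  decide
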